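-- pv_equiv track=rewrite | github.com/Nickless-cmd/jarvis-v2 | apps/api/jarvis_api/services/embodied_state.py | _derive_primary_state
-- ===== SOURCE A (Python) =====
-- def _derive_primary_state(facts_surface: dict[str, dict[str, object]]) -> str:
--     severities = []
--     for item in facts_surface.values():
--         bucket = str(item.get("bucket") or "unavailable")
--         if bucket != "unavailable":
--             severities.append(_severity(bucket))
--     if not severities:
--         return "steady"
--
--     highest = max(severities)
--     strained_count = sum(1 for value in severities if value >= 2)
--     loaded_count = sum(1 for value in severities if value >= 1)
--
--     if highest >= 3:
--         return "degraded"
--     if strained_count >= 1: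
--         return "strained"
--     if loaded_count >= 1:
--         return "loaded"
--     return "steady"
--
-- def _severity(bucket: str) -> int:
--     return {
--         "steady": 0,
--         "loaded": 1,
--         "strained": 2,
--         "degraded": 3,
--     }.get(bucket, 0)
-- ===== SOURCE B (Python) =====
-- _ORDER = ("steady", "loaded", "strained", "degraded")
--
--
-- def _derive_primary_state(facts_surface: dict[str, dict[str, object]]) -> str:
--     highest = 0
--     for item in facts_surface.values():
--         bucket = str(item.get("bucket") or "unavailable")
--         if bucket == "unavailable":
--             continue
--         sev = _ORDER.index(bucket) if bucket in _ORDER else 0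
--         if sev > highest:
--             highest = sev
--     return _ORDER[highest]
-- ===== Notes on version B (the rewrite author's own statement) =====
-- stated objective: simpler
-- what changed: B replaces A's materialized severities list, max() plus two threshold-count reductions and the four-way if/elif cascade by a single running-max pass over the buckets and one direct index into the ordered state table.
import Mathlib
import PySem

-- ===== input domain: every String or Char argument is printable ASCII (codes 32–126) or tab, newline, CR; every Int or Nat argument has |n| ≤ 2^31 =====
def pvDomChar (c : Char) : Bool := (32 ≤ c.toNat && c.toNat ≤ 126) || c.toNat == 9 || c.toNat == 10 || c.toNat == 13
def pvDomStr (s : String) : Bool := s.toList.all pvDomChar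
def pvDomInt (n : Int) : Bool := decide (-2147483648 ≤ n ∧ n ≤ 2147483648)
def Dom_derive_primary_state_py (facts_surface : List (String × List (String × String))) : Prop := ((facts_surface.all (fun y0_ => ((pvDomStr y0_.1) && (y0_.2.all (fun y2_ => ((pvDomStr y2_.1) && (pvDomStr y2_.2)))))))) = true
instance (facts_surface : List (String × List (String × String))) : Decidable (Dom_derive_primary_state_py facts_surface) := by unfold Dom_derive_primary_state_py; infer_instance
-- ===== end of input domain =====

-- B replaces A's severities list plus three reductions and an if/elif cascade by one running-max pass
-- and a direct table lookup (objective: simpler; same O(n) cost).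

-- ===== PORT A =====
-- _severity: dict lookup with default 0
def pvSeverityA (bucket : String) : Int :=
  (PySem.Dict.mk [("steady", (0 : Int)), ("loaded", 1), ("strained", 2), ("degraded", 3)]).getD bucket 0

-- loop body: bucket = str(item.get("bucket") or "unavailable") — get's None and the empty string are falsy
def pvStepAFn (acc : List Int) (kv : String × List (String × String)) : List Int :=
  let bucket : String :=
    match (PySem.Dict.mk kv.2).get? "bucket" with
    | none => "unavailable"
    | some s => if s = "" then "unavailable" else s
  if bucket ≠ "unavailable" then acc ++ [pvSeverityA bucket] else acc

def derive_primary_state_py (facts_surface : List (String × List (String × String))) : String :=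
  let severities : List Int := facts_surface.foldl pvStepAFn []
  if severities = [] then "steady"
  else
    let highest : Int := (PySem.List.max? severities (fun v => v)).getD 0  -- max(severities), nonempty here
    -- sum(1 for value in severities if value >= k) is the count of elements ≥ k
    let strained_count : Int := (severities.countP (fun v => 2 ≤ v) : Int)
    let loaded_count : Int := (severities.countP (fun v => 1 ≤ v) : Int)
    if 3 ≤ highest then "degraded"
    else if 1 ≤ strained_count then "strained"
    else if 1 ≤ loaded_count then "loaded"
    else "steady"

-- ===== PORT B =====
def pvOrder : List String := ["steady", "loaded", "strained", "degraded"]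

-- loop body: skip unavailable, take the bucket's position in _ORDER (0 when absent), keep the running max
def pvStepBFn (h : Int) (kv : String × List (String × String)) : Int :=
  let bucket : String :=
    match (PySem.Dict.mk kv.2).get? "bucket" with
    | none => "unavailable"
    | some s => if s = "" then "unavailable" else s
  if bucket = "unavailable" then h
  else
    let sev : Int := if pvOrder.contains bucket then (((PySem.List.index? pvOrder bucket).getD 0 : Nat) : Int) else 0
    if sev > h then sev else h

def derive_primary_state_py_alt (facts_surface : List (String × List (String × String))) : String :=
  let highest : Int := facts_surface.foldl pvStepBFn 0
  -- _ORDER[highest]: highest is always in 0..3, so this indexing never falls back to the default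
  pvOrder.getD highest.toNat "steady"

-- ===== PRECONDITION & SPEC =====
def Spec_derive_primary_state_py (facts_surface : List (String × List (String × String))) (out : String) : Prop := out = derive_primary_state_py_alt facts_surface
instance (facts_surface : List (String × List (String × String))) (out : String) : Decidable (Spec_derive_primary_state_py facts_surface out) := by unfold Spec_derive_primary_state_py; infer_instance

-- ===== CLAIM (what is proved, stated in full; the proofs are below) =====
def Claim_equal_derive_primary_state_py : Prop := ∀ (facts_surface : List (String × List (String × String))), Dom_derive_primary_state_py facts_surface → Spec_derive_primary_state_py facts_surface (derive_primary_state_py facts_surface)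

-- ===== LEMMAS AND PROOFS =====

-- the severity contributed by one entry, or none when its bucket is unavailable
def pvSevOf? (kv : String × List (String × String)) : Option Int :=
  match (PySem.Dict.mk kv.2).get? "bucket" with
  | none => none
  | some s => if s = "" then none else if s = "unavailable" then none else some (pvSeverityA s)

theorem pvStepA (acc : List Int) (kv : String × List (String × String)) :
    pvStepAFn acc kv = acc ++ (pvSevOf? kv).toList := by
  unfold pvStepAFn pvSevOf?
  rcases h : (PySem.Dict.mk kv.2).get? "bucket" with _ | b
  · simp
  · by_cases h1 : b = "" <;> by_cases h2 : b = "unavailable" <;> simp [h1, h2]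

theorem pvFoldA (fs : List (String × List (String × String))) (acc : List Int) :
    fs.foldl pvStepAFn acc = acc ++ fs.filterMap pvSevOf? := by
  induction fs generalizing acc with
  | nil => simp
  | cons kv t ih =>
    simp only [List.foldl_cons, List.filterMap_cons, pvStepA]
    cases pvSevOf? kv <;> simp [ih]

theorem pvSevB_eq (bucket : String) :
    (if pvOrder.contains bucket then (((PySem.List.index? pvOrder bucket).getD 0 : Nat) : Int) else 0)
    = pvSeverityA bucket := by
  by_cases hc : pvOrder.contains bucket
  · have hm : bucket ∈ pvOrder := by simpa using hc
    simp only [pvOrder, List.mem_cons, List.not_mem_nil, or_false] at hm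
    rcases hm with rfl | rfl | rfl | rfl <;> decide
  · have hc' : pvOrder.contains bucket = false := by simpa using hc
    have hm : bucket ∉ pvOrder := by simpa using hc
    simp only [pvOrder, List.mem_cons, List.not_mem_nil, or_false, not_or] at hm
    obtain ⟨h1, h2, h3, h4⟩ := hm
    simp only [hc', Bool.false_eq_true, if_false, pvSeverityA, PySem.Dict.getD, PySem.Dict.get?_mk_cons]
    simp [(by simpa using (Ne.symm h1) : ("steady" == bucket) = false),
      (by simpa using (Ne.symm h2) : ("loaded" == bucket) = false),
      (by simpa using (Ne.symm h3) : ("strained" == bucket) = false),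
      (by simpa using (Ne.symm h4) : ("degraded" == bucket) = false), PySem.Dict.get?]

theorem pvStepB (h : Int) (kv : String × List (String × String)) :
    pvStepBFn h kv = (pvSevOf? kv).elim h (max h) := by
  unfold pvStepBFn pvSevOf?
  rcases hg : (PySem.Dict.mk kv.2).get? "bucket" with _ | b
  · simp
  · simp only [pvSevB_eq]
    by_cases h1 : b = "" <;> by_cases h2 : b = "unavailable" <;> simp [h1, h2]
    omega

theorem pvFoldB (fs : List (String × List (String × String))) (h : Int) :
    fs.foldl pvStepBFn h = (fs.filterMap pvSevOf?).foldl max h := by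
  induction fs generalizing h with
  | nil => simp
  | cons kv t ih =>
    simp only [List.foldl_cons, List.filterMap_cons, pvStepB]
    cases pvSevOf? kv <;> simp [ih, Option.elim]

theorem pvSevBounds (b : String) : 0 ≤ pvSeverityA b ∧ pvSeverityA b ≤ 3 := by
  simp only [pvSeverityA, PySem.Dict.getD, PySem.Dict.get?_mk_cons]
  split_ifs <;> simp [PySem.Dict.get?]

theorem pvDecision (sv : List Int) (hb : ∀ s ∈ sv, 0 ≤ s ∧ s ≤ 3) :
    (if sv = [] then "steady"
     else
       let highest : Int := (PySem.List.max? sv (fun v => v)).getD 0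
       let strained_count : Int := (sv.countP (fun v => 2 ≤ v) : Int)
       let loaded_count : Int := (sv.countP (fun v => 1 ≤ v) : Int)
       if 3 ≤ highest then "degraded"
       else if 1 ≤ strained_count then "strained"
       else if 1 ≤ loaded_count then "loaded"
       else "steady")
    = pvOrder.getD (sv.foldl max 0).toNat "steady" := by
  cases sv with
  | nil => simp [pvOrder]
  | cons x t =>
    obtain ⟨hx0, hx3⟩ := hb x (by simp)
    have hattain := PySem.List.foldl_max_mem t x
    obtain ⟨hxle, htle⟩ := PySem.List.le_foldl_max t x
    have hH0 : 0 ≤ t.foldl max x := le_trans hx0 hxle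
    have hH3 : t.foldl max x ≤ 3 := by
      rcases hattain with h | h
      · omega
      · exact (hb _ (List.mem_cons_of_mem x h)).2
    have hM : (x :: t).foldl max 0 = t.foldl max x := by
      rw [List.foldl_cons, max_eq_right hx0]
    have c2 : (1 ≤ ((x :: t).countP (fun v => 2 ≤ v) : Int)) ↔ 2 ≤ t.foldl max x := by
      rw [show (1 ≤ ((x :: t).countP (fun v => 2 ≤ v) : Int)) ↔ 0 < (x :: t).countP (fun v => 2 ≤ v) by omega,
        List.countP_pos_iff]
      constructor
      · rintro ⟨a, ha, hpa⟩
        simp only [decide_eq_true_eq] at hpa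
        rcases List.mem_cons.1 ha with rfl | ha' <;> [exact le_trans hpa hxle; exact le_trans hpa (htle a ha')]
      · intro h2
        rcases hattain with h | h
        · exact ⟨x, by simp, by simpa using (h ▸ h2)⟩
        · exact ⟨_, List.mem_cons_of_mem x h, by simpa using h2⟩
    have c1 : (1 ≤ ((x :: t).countP (fun v => 1 ≤ v) : Int)) ↔ 1 ≤ t.foldl max x := by
      rw [show (1 ≤ ((x :: t).countP (fun v => 1 ≤ v) : Int)) ↔ 0 < (x :: t).countP (fun v => 1 ≤ v) by omega,
        List.countP_pos_iff]
      constructor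
      · rintro ⟨a, ha, hpa⟩
        simp only [decide_eq_true_eq] at hpa
        rcases List.mem_cons.1 ha with rfl | ha' <;> [exact le_trans hpa hxle; exact le_trans hpa (htle a ha')]
      · intro h2
        rcases hattain with h | h
        · exact ⟨x, by simp, by simpa using (h ▸ h2)⟩
        · exact ⟨_, List.mem_cons_of_mem x h, by simpa using h2⟩
    simp only [if_neg (List.cons_ne_nil x t), PySem.List.max?_id_cons, Option.getD_some, hM]
    by_cases h3 : (3 : Int) ≤ t.foldl max x
    · rw [if_pos h3]
      have : t.foldl max x = 3 := le_antisymm hH3 h3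
      rw [this]; rfl
    · rw [if_neg h3]
      by_cases h2 : (2 : Int) ≤ t.foldl max x
      · rw [if_pos (c2.2 h2)]
        have : t.foldl max x = 2 := by omega
        rw [this]; rfl
      · rw [if_neg (fun hc => h2 (c2.1 hc))]
        by_cases h1 : (1 : Int) ≤ t.foldl max x
        · rw [if_pos (c1.2 h1)]
          have : t.foldl max x = 1 := by omega
          rw [this]; rfl
        · rw [if_neg (fun hc => h1 (c1.1 hc))]
          have : t.foldl max x = 0 := by omega
          rw [this]; rfl

-- ===== VERDICT (by name: the statement is the Claim_ definition above) =====
theorem derive_primary_state_py_spec : Claim_equal_derive_primary_state_py := by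
  intro fs _
  unfold Spec_derive_primary_state_py derive_primary_state_py derive_primary_state_py_alt
  rw [pvFoldA, pvFoldB]
  simp only [List.nil_append]
  apply pvDecision
  intro s hs
  rcases List.mem_filterMap.1 hs with ⟨kv, _, hkv⟩
  unfold pvSevOf? at hkv
  rcases hmatch : (PySem.Dict.mk kv.2).get? "bucket" with _ | b <;> rw [hmatch] at hkv
  · simp at hkv
  · by_cases h1 : b = "" <;> by_cases h2 : b = "unavailable" <;> simp [h1, h2] at hkv
    all_goals (subst hkv; exact pvSevBounds b)
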